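-- pv_equiv track=rewrite | github.com/samliddicott/mcpash | src/mctash/lexer.py | _normalize_heredoc_delim
-- ===== SOURCE A (Python) =====
-- def _normalize_heredoc_delim(token: str) -> str:
--     out: list[str] = []
--     i = 0
--     while i < len(token):
--         ch = token[i]
--         if ch in {"'", '"'}:
--             i += 1
--             continue
--         if ch == "\\" and i + 1 < len(token):
--             out.append(token[i + 1])
--             i += 2
--             continue
--         out.append(ch)
--         i += 1
--     return "".join(out)
-- ===== SOURCE B (Python) =====
-- import re
--
-- _HEREDOC_DELIM_RE = re.compile(r'\\([\s\S])|["\']')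
--
--
-- def _normalize_heredoc_delim(token: str) -> str:
--     return _HEREDOC_DELIM_RE.sub(
--         lambda m: m.group(1) if m.group(1) is not None else "", token
--     )
-- ===== Notes on version B (the rewrite author's own statement) =====
-- stated objective: idiomatic
-- what changed: Replaces the explicit index loop with accumulator by a single re.sub whose alternation emits the character captured after a backslash and deletes bare quotes.
import Mathlib
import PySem

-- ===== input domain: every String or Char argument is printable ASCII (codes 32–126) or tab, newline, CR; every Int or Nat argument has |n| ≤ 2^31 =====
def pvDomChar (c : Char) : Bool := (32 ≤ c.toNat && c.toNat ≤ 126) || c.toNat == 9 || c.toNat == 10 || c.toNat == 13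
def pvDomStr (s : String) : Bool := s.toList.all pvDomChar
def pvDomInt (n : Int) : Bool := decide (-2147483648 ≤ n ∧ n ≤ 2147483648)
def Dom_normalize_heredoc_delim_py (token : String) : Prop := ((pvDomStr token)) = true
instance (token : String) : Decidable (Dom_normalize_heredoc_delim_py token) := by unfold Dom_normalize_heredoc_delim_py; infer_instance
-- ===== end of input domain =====

-- B replaces A's index loop + accumulator with one regex substitution (idiomatic); same return value.

-- ===== PORT A =====
-- A's while loop over index i with list accumulator `out`; the remaining suffix token[i:]
-- is the first argument, `out` (kept reversed, Python appends) the second.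
def pvALoop : List Char → List Char → List Char
  | [], out => out.reverse
  | ch :: rest, out =>
    if ch = '\'' ∨ ch = '"' then pvALoop rest out
    else if ch = '\\' then
      match rest with
      | c :: rest' => pvALoop rest' (c :: out)   -- i + 1 < len(token): append token[i+1], i += 2
      | [] => pvALoop [] (ch :: out)           -- trailing backslash: plain append branch
    else pvALoop rest (ch :: out)
  termination_by l _ => l.length
  decreasing_by all_goals simp

def normalize_heredoc_delim_py (token : String) : String :=
  String.ofList (pvALoop token.toList [])

-- ===== PORT B =====
-- Source B is re.sub(r'\\([\s\S])|["\']', repl, token): the regex engine scans left to right,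
-- non-overlapping; at each position the branch `\\([\s\S])` (two chars, emits the captured
-- second char) is tried first, then `["']` (emits nothing); an unmatched char is copied.
-- Ported exactly as that scan:
def pvBScan : List Char → List Char
  | [] => []
  | '\\' :: c :: rest => c :: pvBScan rest          -- branch \\([\s\S]): emit group(1)
  | c :: rest =>
    if c = '"' ∨ c = '\'' then pvBScan rest         -- branch ["']: replaced by ""
    else c :: pvBScan rest                          -- no match: char copied verbatim

def normalize_heredoc_delim_py_alt (token : String) : String :=
  String.ofList (pvBScan token.toList)

-- ===== PRECONDITION & SPEC =====
def Spec_normalize_heredoc_delim_py (token : String) (out : String) : Prop := out = normalize_heredoc_delim_py_alt token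
instance (token : String) (out : String) : Decidable (Spec_normalize_heredoc_delim_py token out) := by unfold Spec_normalize_heredoc_delim_py; infer_instance

-- ===== CLAIM (what is proved, stated in full; the proofs are below) =====
def Claim_equal_normalize_heredoc_delim_py : Prop := ∀ (token : String), Dom_normalize_heredoc_delim_py token → Spec_normalize_heredoc_delim_py token (normalize_heredoc_delim_py token)

-- ===== LEMMAS AND PROOFS =====

theorem pvBScan_cons_ne (ch : Char) (rest : List Char) (h : ¬ ch = '\\') :
    pvBScan (ch :: rest) = if ch = '"' ∨ ch = '\'' then pvBScan rest else ch :: pvBScan rest := by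
  rw [pvBScan.eq_def]
  split
  · simp_all
  · rename_i c r heq
    rw [List.cons.injEq] at heq
    exact absurd heq.1 h
  · rename_i c r heq
    rw [List.cons.injEq] at heq
    obtain ⟨h1, h2⟩ := heq
    subst h1; subst h2; rfl

theorem pvALoop_eq (l out : List Char) : pvALoop l out = out.reverse ++ pvBScan l := by
  fun_induction pvALoop l out with
  | case1 => simp [pvBScan]
  | case2 ch rest out hq ih =>
      rw [ih, pvBScan_cons_ne ch rest (by rintro rfl; simp at hq)]
      rcases hq with h | h <;> simp [h]
  | case3 out c rest' hq ih =>
      rw [ih]; simp [pvBScan]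
  | case4 out hq ih =>
      rw [ih]; simp [pvBScan]
  | case5 ch rest out hq hb ih =>
      rw [ih, pvBScan_cons_ne ch rest hb]
      have h1 : ¬ ch = '"' := by rintro rfl; exact hq (Or.inr rfl)
      have h2 : ¬ ch = '\'' := by rintro rfl; exact hq (Or.inl rfl)
      simp [h1, h2]

-- ===== VERDICT (by name: the statement is the Claim_ definition above) =====
theorem normalize_heredoc_delim_py_spec : Claim_equal_normalize_heredoc_delim_py := by
  intro token _
  unfold Spec_normalize_heredoc_delim_py normalize_heredoc_delim_py normalize_heredoc_delim_py_alt
  rw [pvALoop_eq]; rfl
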